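-- pv_equiv track=rewrite | github.com/ashwin1241/Selenium_Web_Crawler | Part-B/Script.py | fn
-- ===== SOURCE A (Python) =====
-- def fn(name1, f):
--     f1 = False
--     name = ''
--     for line in f:
--         line1 = line.split(' ')
--         for word in line1:
--             if word == name1:
--                 f1 = True
--                 continue
--             if f1:
--                 name = word
--                 break
--         if f1:
--             break
--     return name
-- ===== SOURCE B (Python) =====
-- def fn(name1, f):
--     for line in f:
--         words = line.split(' ')
--         if name1 in words:
--             i = words.index(name1)
--             for w in words[i + 1:]:
--                 if w != name1:
--                     return w
--             return ''
--     return ''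
-- ===== Notes on version B (the rewrite author's own statement) =====
-- stated objective: simpler
-- what changed: Replaced A's cross-loop boolean-flag state machine (flag set in the inner loop, tested after it, state threaded across lines) with a per-line decomposition: on the first line containing name1, look up its first index and return the first following word differing from name1 (or '' if none), with direct returns instead of flag-driven breaks.
import Mathlib
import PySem

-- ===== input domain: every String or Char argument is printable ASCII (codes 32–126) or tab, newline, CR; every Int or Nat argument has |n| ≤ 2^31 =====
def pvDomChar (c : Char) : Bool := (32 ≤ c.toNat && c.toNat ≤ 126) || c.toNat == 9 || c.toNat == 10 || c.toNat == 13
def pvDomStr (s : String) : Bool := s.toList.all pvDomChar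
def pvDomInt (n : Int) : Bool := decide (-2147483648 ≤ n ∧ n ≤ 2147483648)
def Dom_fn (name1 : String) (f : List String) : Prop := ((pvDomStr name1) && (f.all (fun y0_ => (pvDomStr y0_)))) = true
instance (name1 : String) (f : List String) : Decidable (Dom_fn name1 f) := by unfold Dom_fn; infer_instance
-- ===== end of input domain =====

-- B replaces A's cross-loop boolean-flag state machine by a per-line locate-then-lookahead decomposition (objective: simpler).

-- ===== PORT A =====
-- inner loop over the words of one line, threading the flag f1 and name; the Bool in the
-- result is the flag after the loop, the String the current name (set on break or kept)
def fnInner (name1 : String) (f1 : Bool) (name : String) : List String → Bool × String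
  | [] => (f1, name)
  | w :: ws =>
      if w == name1 then fnInner name1 true name ws
      else if f1 then (true, w)
      else fnInner name1 f1 name ws

-- outer loop over the lines, breaking as soon as f1 is set
def fnOuter (name1 : String) (f1 : Bool) (name : String) : List String → String
  | [] => name
  | line :: rest =>
      let r := fnInner name1 f1 name ((PySem.Str.split? line " ").getD [])
      if r.1 then r.2 else fnOuter name1 r.1 r.2 rest

def fn (name1 : String) (f : List String) : String := fnOuter name1 false "" f

-- ===== PORT B =====
-- Source B's 'for w in words[i+1:]' lookahead loop
def fnAltScan (name1 : String) : List String → String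
  | [] => ""
  | w :: ws => if w ≠ name1 then w else fnAltScan name1 ws

-- Source B's loop over lines: first line containing name1 decides the answer
def fnAltLines (name1 : String) : List String → String
  | [] => ""
  | line :: rest =>
      let words := (PySem.Str.split? line " ").getD []
      if name1 ∈ words then
        match PySem.List.index? words name1 with
        | some i => fnAltScan name1 (PySem.List.slice words (some ((i : Int) + 1)) none)  -- words[i+1:]
        | none => ""   -- unreachable: name1 ∈ words
      else fnAltLines name1 rest

def fn_alt (name1 : String) (f : List String) : String := fnAltLines name1 f

-- ===== PRECONDITION & SPEC =====
def Spec_fn (name1 : String) (f : List String) (out : String) : Prop := out = fn_alt name1 f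
instance (name1 : String) (f : List String) (out : String) : Decidable (Spec_fn name1 f out) := by unfold Spec_fn; infer_instance

-- ===== CLAIM (what is proved, stated in full; the proofs are below) =====
def Claim_equal_fn : Prop := ∀ (name1 : String) (f : List String), Dom_fn name1 f → Spec_fn name1 f (fn name1 f)

-- ===== LEMMAS AND PROOFS =====

theorem fnInner_true_of_empty (name1 : String) (ws : List String) :
    fnInner name1 true "" ws = (true, fnAltScan name1 ws) := by
  induction ws with
  | nil => simp [fnInner, fnAltScan]
  | cons w ws ih =>
      by_cases h : w = name1
      · simpa [fnInner, fnAltScan, h] using ih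
      · simp [fnInner, fnAltScan, h]

theorem fnInner_not_mem (name1 name : String) (ws : List String) (h : name1 ∉ ws) :
    fnInner name1 false name ws = (false, name) := by
  induction ws with
  | nil => simp [fnInner]
  | cons w ws ih =>
      have hw : w ≠ name1 := fun e => h (e ▸ List.mem_cons_self)
      have hws : name1 ∉ ws := fun m => h (List.mem_cons_of_mem _ m)
      simp [fnInner, hw, ih hws]

theorem fnInner_mem (name1 : String) (ws : List String) (h : name1 ∈ ws) :
    ∃ i, PySem.List.index? ws name1 = some i ∧
      fnInner name1 false "" ws = (true, fnAltScan name1 (ws.drop (i + 1))) := by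
  induction ws with
  | nil => cases h
  | cons w ws ih =>
      by_cases hw : w = name1
      · refine ⟨0, by rw [hw, PySem.List.index?_cons_self], ?_⟩
        simp [fnInner, hw, fnInner_true_of_empty]
      · have hm : name1 ∈ ws := by
          rcases List.mem_cons.mp h with e | m
          · exact absurd e.symm hw
          · exact m
        obtain ⟨i, hi, he⟩ := ih hm
        refine ⟨i + 1, ?_, ?_⟩
        · rw [PySem.List.index?_cons_of_ne ws hw, hi]; rfl
        · simp [fnInner, hw, he]

theorem slice_from (ws : List String) (i : ℕ) :
    PySem.List.slice ws (some ((i : Int) + 1)) none = ws.drop (i + 1) := by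
  have : ((i : Int) + 1) = ((i + 1 : ℕ) : Int) := by push_cast; ring
  rw [this, PySem.List.slice_from_natCast]

theorem outer_eq (name1 : String) (f : List String) :
    fnOuter name1 false "" f = fnAltLines name1 f := by
  induction f with
  | nil => simp [fnOuter, fnAltLines]
  | cons line rest ih =>
      by_cases h : name1 ∈ (PySem.Str.split? line " ").getD []
      · obtain ⟨i, hi, he⟩ := fnInner_mem name1 _ h
        rw [PySem.List.index?_eq_idxOf?] at hi
        simp [fnOuter, fnAltLines, h, hi, he, slice_from]
      · have := fnInner_not_mem name1 "" _ h
        simp [fnOuter, fnAltLines, h, this, ih]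

-- ===== VERDICT (by name: the statement is the Claim_ definition above) =====
theorem fn_spec : Claim_equal_fn := by
  intro name1 f _
  unfold Spec_fn fn fn_alt
  exact outer_eq name1 f
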